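-- pv_equiv track=rewrite | github.com/oguh43/bilicka | Hugo Bohácsek/maturitné zadania/9,10/10.py | colorCode
-- ===== SOURCE A (Python) =====
-- def check(inp):
--     b = 0
--     for c in inp:
--         if c == "(":
--             b += 1
--         elif c == ")":
--             b -= 1
--         if b < 0:
--             return False
--     if b != 0:
--         return False
--     return True
--
-- def colorCode(inp):
--     if not check(inp):
--         return {}
--     data = {}
--     ls = []
--     for i in range(0, len(inp)):
--         char = inp[i]
--         if char == "(":
--             data[i] = -1
--             ls.append(i)
--         elif char == ")":
--             data[ls.pop()] = i
--     return data
-- ===== SOURCE B (Python) =====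
-- def colorCode(inp):
--     stack = []
--     pairs = {}
--     for i, ch in enumerate(inp):
--         if ch == "(":
--             stack.append(i)
--         elif ch == ")":
--             if not stack:
--                 return {}
--             pairs[stack.pop()] = i
--     if stack:
--         return {}
--     return dict(sorted(pairs.items(), key=lambda kv: kv[0]))
-- ===== Notes on version B (the rewrite author's own statement) =====
-- stated objective: faster
-- what changed: Fuses A's separate check() validity pre-pass and its matching pass into one single pass that records each match on pop and bails out on imbalance, emitting the result in key order at the end.
import Mathlib
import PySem

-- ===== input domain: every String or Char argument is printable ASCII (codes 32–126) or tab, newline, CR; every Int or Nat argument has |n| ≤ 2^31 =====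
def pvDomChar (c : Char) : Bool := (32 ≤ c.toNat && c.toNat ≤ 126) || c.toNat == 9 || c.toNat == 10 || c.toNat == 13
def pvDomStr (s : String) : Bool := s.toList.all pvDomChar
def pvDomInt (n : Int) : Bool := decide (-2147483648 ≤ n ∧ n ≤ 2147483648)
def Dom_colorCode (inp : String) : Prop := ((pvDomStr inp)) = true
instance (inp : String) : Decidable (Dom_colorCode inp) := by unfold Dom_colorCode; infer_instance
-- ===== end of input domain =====

-- B fuses A's separate check() pre-pass and its matching pass into ONE pass over the string
-- (stack of open indices, bail out on imbalance), emitting the matched pairs in key order at the end.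

-- ===== PORT A =====
-- check(inp): loop over the characters threading the counter b; the early 'return False' stops the recursion.
def checkA : List Char → Int → Bool
  | [], b => !(b != 0)
  | c :: rest, b =>
    let b' := if c = '(' then b + 1 else if c = ')' then b - 1 else b
    if b' < 0 then false else checkA rest b'

-- A's matching loop: 'for i in range(0, len(inp))' reading inp[i], threading (data, ls);
-- ls.pop() pops the last element. The 'none' arm of pop? (Python would raise IndexError) is
-- unreachable: colorCode runs this loop only after check() succeeded.
def aLoop : List Char → Int → PySem.Dict Int Int → List Int → PySem.Dict Int Int
  | [], _, data, _ => data
  | c :: rest, i, data, ls =>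
    if c = '(' then aLoop rest (i + 1) (data.insert i (-1)) (ls ++ [i])
    else if c = ')' then
      match PySem.List.pop? ls with
      | some (j, ls') => aLoop rest (i + 1) (data.insert j i) ls'
      | none => aLoop rest (i + 1) data ls
    else aLoop rest (i + 1) data ls

def colorCode (inp : String) : List (Int × Int) :=
  if !(checkA inp.toList 0) then []
  else (aLoop inp.toList 0 PySem.Dict.empty []).items

-- ===== PORT B =====
-- B's single pass: 'for i, ch in enumerate(inp)'; the 'none' result is the early 'return {}' on an unmatched ')'.
def bLoop : List Char → Int → List Int → PySem.Dict Int Int →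
    Option (List Int × PySem.Dict Int Int)
  | [], _, stack, pairs => some (stack, pairs)
  | c :: rest, i, stack, pairs =>
    if c = '(' then bLoop rest (i + 1) (stack ++ [i]) pairs
    else if c = ')' then
      match PySem.List.pop? stack with
      | none => none
      | some (j, stack') => bLoop rest (i + 1) stack' (pairs.insert j i)
    else bLoop rest (i + 1) stack pairs

def colorCode_alt (inp : String) : List (Int × Int) :=
  match bLoop inp.toList 0 [] PySem.Dict.empty with
  | none => []
  | some (stack, pairs) =>
    if stack ≠ [] then []
    else PySem.List.sorted pairs.items (fun kv => kv.1) false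

-- ===== PRECONDITION & SPEC =====
def Spec_colorCode (inp : String) (out : List (Int × Int)) : Prop := out = colorCode_alt inp
instance (inp : String) (out : List (Int × Int)) : Decidable (Spec_colorCode inp out) := by unfold Spec_colorCode; infer_instance

-- ===== CLAIM (what is proved, stated in full; the proofs are below) =====
def Claim_equal_colorCode : Prop := ∀ (inp : String), Dom_colorCode inp → Spec_colorCode inp (colorCode inp)

-- ===== LEMMAS AND PROOFS =====

-- Invariant tying A's matching-loop state (data, ls) to B's state (ls, pairs): the two stacks are
-- literally the same list; data's items are exactly the pairs recorded so far plus (j, -1) for the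
-- opens still on the stack, with strictly increasing keys.
def InvCC (i : Int) (data : PySem.Dict Int Int) (ls : List Int) (pairs : PySem.Dict Int Int) : Prop :=
  ls.Pairwise (· < ·) ∧
  (∀ j ∈ ls, j < i) ∧
  (∀ p ∈ pairs.items, p.1 < i) ∧
  (∀ j ∈ ls, pairs.contains j = false) ∧
  data.items.Perm (pairs.items ++ ls.map (fun j => (j, (-1 : Int)))) ∧
  data.items.Pairwise (fun a b => a.1 < b.1)

lemma invCC_empty : InvCC 0 PySem.Dict.empty [] PySem.Dict.empty := by
  refine ⟨List.Pairwise.nil, ?_, ?_, ?_, ?_, ?_⟩ <;>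
    simp [PySem.Dict.empty]

lemma mem_data_key_lt {i : Int} {data : PySem.Dict Int Int} {ls : List Int}
    {pairs : PySem.Dict Int Int} (hInv : InvCC i data ls pairs) :
    ∀ p ∈ data.items, p.1 < i := by
  obtain ⟨-, h2, h3, -, h5, -⟩ := hInv
  intro p hp
  rcases List.mem_append.mp (h5.mem_iff.mp hp) with h | h
  · exact h3 p h
  · obtain ⟨j, hj, rfl⟩ := List.mem_map.mp h
    exact h2 j hj

lemma contains_false_of_keys_lt {data : PySem.Dict Int Int} {i : Int}
    (h : ∀ p ∈ data.items, p.1 < i) : data.contains i = false := by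
  cases hct : data.contains i with
  | false => rfl
  | true =>
    exfalso
    have hk := (PySem.Dict.contains_iff_mem_keys data i).mp hct
    simp only [PySem.Dict.keys] at hk
    obtain ⟨p, hp, hpi⟩ := List.mem_map.mp hk
    have := h p hp
    omega

lemma checkA_iff_bLoop (l : List Char) (i : Int) (stack : List Int) (pairs : PySem.Dict Int Int) :
    checkA l (stack.length : Int) = true ↔
      ∃ p', bLoop l i stack pairs = some ([], p') := by
  induction l generalizing i stack pairs with
  | nil =>
    simp only [checkA, bLoop]
    constructor
    · intro h
      have hl : stack.length = 0 := by
        have h0 : (stack.length : Int) = 0 := by simpa using h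
        exact_mod_cast h0
      exact ⟨pairs, by rw [List.eq_nil_of_length_eq_zero hl]⟩
    · rintro ⟨p', hp'⟩
      simp only [Option.some.injEq, Prod.mk.injEq] at hp'
      obtain ⟨rfl, -⟩ := hp'
      simp
  | cons c rest ih =>
    by_cases hco : c = '('
    · subst hco
      have hnn : ¬((stack.length : Int) + 1 < 0) := by
        have := Int.natCast_nonneg stack.length; omega
      have hlen : ((stack ++ [i]).length : Int) = (stack.length : Int) + 1 := by
        simp
      simp only [checkA, bLoop, reduceIte]
      rw [if_neg hnn, ← hlen]
      exact ih (i + 1) (stack ++ [i]) pairs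
    · by_cases hcc : c = ')'
      · subst hcc
        rcases stack.eq_nil_or_concat with rfl | ⟨l', j, hcat⟩
        · have hpe : PySem.List.pop? ([] : List Int) = none := by decide
          simp [checkA, bLoop, hpe]
        · rw [List.concat_eq_append] at hcat
          subst hcat
          have hpop := PySem.List.pop?_last l' j
          have hlen : ((l' ++ [j]).length : Int) - 1 = (l'.length : Int) := by
            simp
          have hnn : ¬((l'.length : Int) < 0) := by
            have := Int.natCast_nonneg l'.length; omega
          simp only [checkA, bLoop, show (')' = '(') = False from by decide, if_false, if_true, hpop, hlen]
          rw [if_neg hnn]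
          exact ih (i + 1) l' (pairs.insert j i)
      · have hnn : ¬((stack.length : Int) < 0) := by
          have := Int.natCast_nonneg stack.length; omega
        simp only [checkA, bLoop, if_neg hco, if_neg hcc]
        rw [if_neg hnn]
        exact ih (i + 1) stack pairs

lemma invCC_main (l : List Char) (i : Int) (data : PySem.Dict Int Int) (ls : List Int)
    (pairs : PySem.Dict Int Int) (st' : List Int) (p' : PySem.Dict Int Int)
    (hInv : InvCC i data ls pairs)
    (hb : bLoop l i ls pairs = some (st', p')) :
    InvCC (i + l.length) (aLoop l i data ls) st' p' := by
  induction l generalizing i data ls pairs with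
  | nil =>
    simp only [bLoop, Option.some.injEq, Prod.mk.injEq] at hb
    obtain ⟨rfl, rfl⟩ := hb
    simpa [aLoop] using hInv
  | cons c rest ih =>
    obtain ⟨h1, h2, h3, h4, h5, h6⟩ := hInv
    have hstep : i + (((c :: rest).length : Nat) : Int) = (i + 1) + ((rest.length : Nat) : Int) := by
      simp only [List.length_cons]; push_cast; ring
    rw [hstep]
    by_cases hco : c = '('
    · subst hco
      simp only [bLoop, reduceIte] at hb
      simp only [aLoop, reduceIte]
      have hdk := mem_data_key_lt ⟨h1, h2, h3, h4, h5, h6⟩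
      have hnc : data.contains i = false := contains_false_of_keys_lt hdk
      have hitems := PySem.Dict.items_insert_of_not_contains data (-1 : Int) hnc
      refine ih (i + 1) (data.insert i (-1)) (ls ++ [i]) pairs ⟨?_, ?_, ?_, ?_, ?_, ?_⟩ hb
      · rw [List.pairwise_append]
        refine ⟨h1, List.pairwise_singleton _ _, ?_⟩
        intro a ha b hb'
        simp only [List.mem_singleton] at hb'
        subst hb'
        exact h2 a ha
      · intro j hj
        rcases List.mem_append.mp hj with h | h
        · have := h2 j h; omega
        · simp only [List.mem_singleton] at h; omega
      · intro p hp; have := h3 p hp; omega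
      · intro j hj
        rcases List.mem_append.mp hj with h | h
        · exact h4 j h
        · simp only [List.mem_singleton] at h; subst h
          exact contains_false_of_keys_lt h3
      · rw [hitems]
        have hmapls : (ls ++ [i]).map (fun x => (x, (-1 : Int))) =
            ls.map (fun x => (x, (-1 : Int))) ++ [(i, -1)] := by simp
        rw [hmapls, ← List.append_assoc]
        exact h5.append_right _
      · rw [hitems, List.pairwise_append]
        refine ⟨h6, List.pairwise_singleton _ _, ?_⟩
        intro a ha b hb'
        simp only [List.mem_singleton] at hb'
        subst hb'
        exact hdk a ha
    · by_cases hcc : c = ')'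
      · subst hcc
        rcases ls.eq_nil_or_concat with rfl | ⟨l', j, hcat⟩
        · exfalso
          have hpe : PySem.List.pop? ([] : List Int) = none := by decide
          simp [bLoop, hpe] at hb
        · rw [List.concat_eq_append] at hcat
          subst hcat
          have hpop := PySem.List.pop?_last l' j
          simp only [bLoop, show (')' = '(') = False from by decide, if_false, if_true, hpop] at hb
          simp only [aLoop, show (')' = '(') = False from by decide, if_false, if_true, hpop]
          have hjls : j ∈ l' ++ [j] := by simp
          obtain ⟨hl', -, hcross⟩ := List.pairwise_append.mp h1
          have hlj : ∀ x ∈ l', x < j := fun x hx => hcross x hx j (by simp)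
          have hpnc : pairs.contains j = false := h4 j hjls
          have hpitems := PySem.Dict.items_insert_of_not_contains pairs (i : Int) hpnc
          have hjmem : ((j : Int), (-1 : Int)) ∈ data.items := by
            refine h5.mem_iff.mpr (List.mem_append.mpr (Or.inr ?_))
            exact List.mem_map.mpr ⟨j, hjls, rfl⟩
          obtain ⟨u, v, hd⟩ := List.append_of_mem hjmem
          have hdc : data.contains j = true := by
            rw [PySem.Dict.contains_iff_mem_keys]
            simp only [PySem.Dict.keys]
            exact List.mem_map.mpr ⟨_, hjmem, rfl⟩
          have hditems := PySem.Dict.items_insert_of_contains data (i : Int) hdc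
          rw [hd] at h6
          obtain ⟨hu, hjv, hucross⟩ := List.pairwise_append.mp h6
          obtain ⟨hvgt, hv⟩ := List.pairwise_cons.mp hjv
          have hult : ∀ p ∈ u, p.1 < j := fun p hp =>
            hucross p hp ((j : Int), (-1 : Int)) List.mem_cons_self
          have hmap : (data.insert j i).items = u ++ ((j, (i : Int)) :: v) := by
            rw [hditems, hd, List.map_append, List.map_cons]
            have hmu : List.map (fun p => if (p.1 == j) = true then ((j : Int), (i : Int)) else p) u = u := by
              calc List.map (fun p => if (p.1 == j) = true then ((j : Int), (i : Int)) else p) u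
                  = List.map id u := by
                    apply List.map_congr_left
                    intro p hp
                    have hne : p.1 ≠ j := ne_of_lt (hult p hp)
                    simp [hne]
                _ = u := List.map_id u
            have hmv : List.map (fun p => if (p.1 == j) = true then ((j : Int), (i : Int)) else p) v = v := by
              calc List.map (fun p => if (p.1 == j) = true then ((j : Int), (i : Int)) else p) v
                  = List.map id v := by
                    apply List.map_congr_left
                    intro p hp
                    have hne : p.1 ≠ j := (ne_of_lt (hvgt p hp)).symm
                    simp [hne]
                _ = v := List.map_id v
            rw [hmu, hmv]
            simp
          have hmapls : (l' ++ [j]).map (fun x => (x, (-1 : Int))) =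
              l'.map (fun x => (x, (-1 : Int))) ++ [(j, -1)] := by simp
          have hL : (u ++ v).Perm (pairs.items ++ l'.map (fun x => (x, (-1 : Int)))) := by
            rw [hd, hmapls, ← List.append_assoc] at h5
            have e1 : (u ++ ((j, (-1 : Int)) :: v)).Perm ((j, (-1 : Int)) :: (u ++ v)) :=
              List.perm_middle
            have e2 : ((pairs.items ++ l'.map (fun x => (x, (-1 : Int)))) ++ [(j, (-1 : Int))]).Perm
                ((j, (-1 : Int)) :: (pairs.items ++ l'.map (fun x => (x, (-1 : Int))))) := by
              have := List.perm_middle (a := ((j : Int), (-1 : Int)))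
                (l₁ := pairs.items ++ l'.map (fun x => (x, (-1 : Int))))
                (l₂ := ([] : List (Int × Int)))
              simpa using this
            exact List.Perm.cons_inv (e1.symm.trans (h5.trans e2))
          refine ih (i + 1) (data.insert j i) l' (pairs.insert j i) ⟨hl', ?_, ?_, ?_, ?_, ?_⟩ hb
          · intro x hx
            have := h2 x (List.mem_append.mpr (Or.inl hx)); omega
          · intro p hp
            rw [hpitems] at hp
            rcases List.mem_append.mp hp with h | h
            · have := h3 p h; omega
            · simp only [List.mem_singleton] at h; subst h
              have := h2 j hjls; omega
          · intro x hx
            rw [PySem.Dict.contains_insert]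
            have hne : x ≠ j := ne_of_lt (hlj x hx)
            simp [hne, h4 x (List.mem_append.mpr (Or.inl hx))]
          · rw [hmap, hpitems]
            refine (List.perm_middle).trans ((hL.cons _).trans ?_)
            have heq : (pairs.items ++ [(j, (i : Int))]) ++ l'.map (fun x => (x, (-1 : Int))) =
                pairs.items ++ (j, (i : Int)) :: l'.map (fun x => (x, (-1 : Int))) := by simp
            rw [heq]
            exact List.perm_middle.symm
          · rw [hmap, List.pairwise_append]
            refine ⟨hu, List.pairwise_cons.mpr ⟨hvgt, hv⟩, ?_⟩
            intro a ha b hb'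
            rcases List.mem_cons.mp hb' with rfl | hbv
            · exact hult a ha
            · exact hucross a ha b (List.mem_cons_of_mem _ hbv)
      · simp only [bLoop, if_neg hco, if_neg hcc] at hb
        simp only [aLoop, if_neg hco, if_neg hcc]
        refine ih (i + 1) data ls pairs ⟨h1, ?_, ?_, h4, h5, h6⟩ hb
        · intro j hj; have := h2 j hj; omega
        · intro p hp; have := h3 p hp; omega

-- ===== VERDICT (by name: the statement is the Claim_ definition above) =====
theorem colorCode_spec : Claim_equal_colorCode := by
  intro inp _
  unfold Spec_colorCode colorCode colorCode_alt
  cases hb : bLoop inp.toList 0 [] PySem.Dict.empty with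
  | none =>
    have hc : checkA inp.toList 0 = false := by
      cases hcc : checkA inp.toList 0 with
      | false => rfl
      | true =>
        obtain ⟨p', hp'⟩ := (checkA_iff_bLoop inp.toList 0 [] PySem.Dict.empty).mp
          (by simpa using hcc)
        rw [hb] at hp'; cases hp'
    simp [hc]
  | some sp =>
    obtain ⟨st, p⟩ := sp
    cases st with
    | nil =>
      have hc : checkA inp.toList 0 = true := by
        have := (checkA_iff_bLoop inp.toList 0 [] PySem.Dict.empty).mpr ⟨p, hb⟩
        simpa using this
      have hInv := invCC_main inp.toList 0 PySem.Dict.empty [] PySem.Dict.empty [] p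
        invCC_empty hb
      obtain ⟨-, -, -, -, hperm, hpw⟩ := hInv
      rw [List.map_nil, List.append_nil] at hperm
      have hs := PySem.List.sorted_eq_of_perm_of_pairwise_lt p.items
        ((aLoop inp.toList 0 PySem.Dict.empty []).items) (fun kv => kv.1) hperm hpw
      simp [hc, hs]
    | cons j st =>
      have hc : checkA inp.toList 0 = false := by
        cases hcc : checkA inp.toList 0 with
        | false => rfl
        | true =>
          obtain ⟨p', hp'⟩ := (checkA_iff_bLoop inp.toList 0 [] PySem.Dict.empty).mp
            (by simpa using hcc)
          rw [hb] at hp'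
          simp at hp'
      simp [hc]
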